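-- pv_equiv track=rewrite | github.com/jstep750/VideoOcr | video-ocr/code_union.py | compare_alphabets_num
-- ===== SOURCE A (Python) =====
-- def compare_alphabets_num(str1, str2):
--     alphabets = ['a','b','c','d','e','f','g','h','i','j','k','l','m','n','o','p','q','r','s','t','u','v','w','x','y','z']
--
--     num_alphabets1 = [0 ,0 ,0 ,0 ,0 ,0 ,0 ,0 ,0 ,0 ,0 ,0 ,0 ,0 ,0 ,0 ,0 ,0 ,0 ,0 ,0 ,0 ,0 ,0 ,0 ,0]
--     for c in str1:
--         for (i,b) in enumerate(alphabets):
--             if(c == b):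
--                 num_alphabets1[i] += 1
--
--     num_alphabets2 = [0 ,0 ,0 ,0 ,0 ,0 ,0 ,0 ,0 ,0 ,0 ,0 ,0 ,0 ,0 ,0 ,0 ,0 ,0 ,0 ,0 ,0 ,0 ,0 ,0 ,0 ,0]
--     for c in str2:
--         for (i,b) in enumerate(alphabets):
--             if(c == b):
--                 num_alphabets2[i] += 1
--
--     result = 0
--     for (c1,c2) in zip(num_alphabets1, num_alphabets2):
--         result += abs(c1-c2)
--     return result
-- ===== SOURCE B (Python) =====
-- def compare_alphabets_num(str1, str2):
--     letters = 'abcdefghijklmnopqrstuvwxyz'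
--     xs = sorted(c for c in str1 if c in letters)
--     ys = sorted(c for c in str2 if c in letters)
--     i = j = diff = 0
--     while i < len(xs) and j < len(ys):
--         if xs[i] == ys[j]:
--             i += 1
--             j += 1
--         elif xs[i] < ys[j]:
--             i += 1
--             diff += 1
--         else:
--             j += 1
--             diff += 1
--     return diff + (len(xs) - i) + (len(ys) - j)
-- ===== Notes on version B (the rewrite author's own statement) =====
-- stated objective: faster
-- what changed: Replaces per-letter frequency tables by a symmetric-difference merge: the letters of each string are sorted and a two-pointer scan over the two sorted sequences counts the unmatched elements (matched pairs cancel).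
import Mathlib
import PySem

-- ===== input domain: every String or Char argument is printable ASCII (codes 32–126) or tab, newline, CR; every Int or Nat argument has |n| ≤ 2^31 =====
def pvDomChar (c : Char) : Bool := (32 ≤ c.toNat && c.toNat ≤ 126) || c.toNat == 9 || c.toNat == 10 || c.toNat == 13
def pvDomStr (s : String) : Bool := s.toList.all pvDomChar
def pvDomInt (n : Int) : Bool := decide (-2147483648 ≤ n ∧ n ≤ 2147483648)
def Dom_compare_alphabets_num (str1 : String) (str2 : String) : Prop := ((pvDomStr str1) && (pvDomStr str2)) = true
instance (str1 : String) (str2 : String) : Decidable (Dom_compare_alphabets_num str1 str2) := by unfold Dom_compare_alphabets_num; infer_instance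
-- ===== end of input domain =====

-- B replaces A's per-letter frequency tables by a symmetric-difference merge:
-- each string's letters are sorted and a two-pointer scan counts the unmatched
-- elements, matched pairs cancelling (objective: alternative).

-- ===== PORT A =====
def pvAlphabets : List Char :=
  ['a','b','c','d','e','f','g','h','i','j','k','l','m',
   'n','o','p','q','r','s','t','u','v','w','x','y','z']

-- inner loop: `for (i,b) in enumerate(alphabets): if c == b: num[i] += 1`
-- (here i is always ≥ 0 and < len(num), so `.toNat`/`set`/`getD` are exact)
def pvInner (c : Char) (ns : List Int) : List Int :=
  (PySem.List.enumerate pvAlphabets).foldl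
    (fun ns p => if c == p.2 then ns.set p.1.toNat (ns.getD p.1.toNat 0 + 1) else ns) ns

def compare_alphabets_num (str1 : String) (str2 : String) : Int :=
  ((str1.toList.foldl (fun ns c => pvInner c ns)
      [0,0,0,0,0,0,0,0,0,0,0,0,0,0,0,0,0,0,0,0,0,0,0,0,0,0]).zip
   (str2.toList.foldl (fun ns c => pvInner c ns)
      [0,0,0,0,0,0,0,0,0,0,0,0,0,0,0,0,0,0,0,0,0,0,0,0,0,0,0])).foldl
    (fun r p => r + |p.1 - p.2|) 0

-- ===== PORT B =====
-- `c in letters` (a one-char string membership test) = membership among its characters; exact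
def pvIsLetter (c : Char) : Bool := ("abcdefghijklmnopqrstuvwxyz".toList).contains c

-- the `while i < len(xs) and j < len(ys): ...` loop; both indexings are guarded
-- by the loop condition, so `getD` is exact for `xs[i]` / `ys[j]` here
def pvLoop (xs ys : List Char) (i j : Nat) (diff : Int) : Int :=
  if h : i < xs.length ∧ j < ys.length then
    if xs.getD i 'a' = ys.getD j 'a' then pvLoop xs ys (i + 1) (j + 1) diff
    else if xs.getD i 'a' < ys.getD j 'a' then pvLoop xs ys (i + 1) j (diff + 1)
    else pvLoop xs ys i (j + 1) (diff + 1)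
  else diff + ((xs.length - i : Nat) : Int) + ((ys.length - j : Nat) : Int)
termination_by (xs.length - i) + (ys.length - j)
decreasing_by all_goals omega

def compare_alphabets_num_alt (str1 : String) (str2 : String) : Int :=
  pvLoop (PySem.List.sorted (str1.toList.filter pvIsLetter) (fun c => c) false)
         (PySem.List.sorted (str2.toList.filter pvIsLetter) (fun c => c) false)
         0 0 0

-- ===== PRECONDITION & SPEC =====
def Spec_compare_alphabets_num (str1 : String) (str2 : String) (out : Int) : Prop := out = compare_alphabets_num_alt str1 str2
instance (str1 : String) (str2 : String) (out : Int) : Decidable (Spec_compare_alphabets_num str1 str2 out) := by unfold Spec_compare_alphabets_num; infer_instance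

-- ===== CLAIM (what is proved, stated in full; the proofs are below) =====
def Claim_equal_compare_alphabets_num : Prop := ∀ (str1 : String) (str2 : String), Dom_compare_alphabets_num str1 str2 → Spec_compare_alphabets_num str1 str2 (compare_alphabets_num str1 str2)

-- ===== LEMMAS AND PROOFS =====

theorem pv_foldl_step_len (c : Char) (ps : List (Int × Char)) (ns : List Int) :
    (ps.foldl (fun ns p => if c == p.2 then ns.set p.1.toNat (ns.getD p.1.toNat 0 + 1) else ns) ns).length = ns.length := by
  induction ps generalizing ns with
  | nil => rfl
  | cons p ps ih =>
      simp only [List.foldl_cons]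
      rw [ih]
      split <;> simp

theorem pv_foldl_step_getD (c : Char) (ps : List (Int × Char)) (ns : List Int) (j : Nat)
    (hj : j < ns.length) :
    (ps.foldl (fun ns p => if c == p.2 then ns.set p.1.toNat (ns.getD p.1.toNat 0 + 1) else ns) ns).getD j 0
      = ns.getD j 0 + (ps.countP (fun p => p.1.toNat == j && c == p.2) : Int) := by
  induction ps generalizing ns with
  | nil => simp
  | cons p ps ih =>
      simp only [List.foldl_cons, List.countP_cons]
      by_cases hc : (c == p.2) = true
      · rw [if_pos hc]
        by_cases hi : p.1.toNat = j
        · rw [ih _ (by simpa using hj)]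
          subst hi
          rw [List.getD_eq_getElem?_getD, List.getElem?_set_self (by omega)]
          rw [List.getD_eq_getElem?_getD]
          have hij : ((p.1.toNat == p.1.toNat) && (c == p.2)) = true := by simp [hc]
          simp only [hij, if_pos, Option.getD_some]
          push_cast
          ring
        · rw [ih _ (by simpa using hj)]
          rw [List.getD_eq_getElem?_getD, List.getD_eq_getElem?_getD,
              List.getElem?_set_ne (by omega)]
          have hij : ((p.1.toNat == j) && (c == p.2)) = false := by simp [hi]
          simp [hij]
      · rw [if_neg hc, ih _ hj]
        have hij : ((p.1.toNat == j) && (c == p.2)) = false := by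
          simp [Bool.eq_false_iff.mpr hc]
        simp [hij]

theorem pv_inner_len (c : Char) (ns : List Int) : (pvInner c ns).length = ns.length :=
  pv_foldl_step_len c _ ns

theorem pv_countP_enum (c : Char) (xs : List Char) (s j : Nat) :
    (PySem.List.enumerate xs (s : Int)).countP (fun p => p.1.toNat == j && c == p.2)
      = if s ≤ j ∧ j - s < xs.length ∧ c = xs.getD (j - s) 'a' then 1 else 0 := by
  induction xs generalizing s with
  | nil => simp [PySem.List.enumerate_nil]
  | cons x xs ih =>
      rw [PySem.List.enumerate_cons, List.countP_cons]
      have hcast : (s : Int) + 1 = ((s + 1 : Nat) : Int) := by push_cast; ring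
      rw [hcast, ih (s + 1)]
      by_cases hsj : s = j
      · subst hsj
        have h1 : ¬ (s + 1 ≤ s ∧ s - (s + 1) < xs.length ∧ c = xs.getD (s - (s + 1)) 'a') := by
          omega
        have h2 : (((s : Int).toNat == s) && (c == x)) = (c == x) := by simp
        simp only [h1, h2]
        by_cases hcx : c = x
        · simp [hcx]
        · simp [Bool.eq_false_iff.mpr (by simpa using hcx : ¬ (c == x) = true), hcx]
      · have h2 : (((s : Int).toNat == j) && (c == x)) = false := by
          simp [hsj]
        simp only [h2, Bool.false_eq_true, if_false, add_zero]
        by_cases hle : s + 1 ≤ j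
        · have he : j - s = (j - (s + 1)) + 1 := by omega
          rw [he, List.getD_cons_succ]
          have hsl : s + 1 ≤ j ↔ s ≤ j := by omega
          have hll : j - (s + 1) < xs.length ↔ j - (s + 1) + 1 < (x :: xs).length := by
            rw [List.length_cons]; omega
          rw [if_congr (by rw [hsl, hll]) rfl rfl]
        · have h3 : ¬ (s + 1 ≤ j ∧ j - (s + 1) < xs.length ∧ c = xs.getD (j - (s + 1)) 'a') := by
            omega
          have h4 : ¬ (s ≤ j ∧ j - s < (x :: xs).length ∧ c = (x :: xs).getD (j - s) 'a') := by
            rintro ⟨a, b, d⟩; omega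
          rw [if_neg h3, if_neg h4]

theorem pv_countM (c : Char) (j : Nat) (hj : j < 26) :
    (PySem.List.enumerate pvAlphabets).countP (fun p => p.1.toNat == j && c == p.2)
      = if c == pvAlphabets.getD j 'a' then 1 else 0 := by
  rw [show PySem.List.enumerate pvAlphabets = PySem.List.enumerate pvAlphabets ((0 : Nat) : Int) from rfl,
      pv_countP_enum c pvAlphabets 0 j]
  have hlen : pvAlphabets.length = 26 := rfl
  by_cases h : c = pvAlphabets.getD j 'a'
  · rw [if_pos ⟨Nat.zero_le j, by omega, by simpa using h⟩, if_pos (by simpa using h)]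
  · rw [if_neg (by rintro ⟨-, -, hh⟩; simp at hh; exact h hh),
        if_neg (by simpa using h)]

theorem pv_inner_getD (c : Char) (ns : List Int) (j : Nat) (hj : j < ns.length) (hj26 : j < 26) :
    (pvInner c ns).getD j 0
      = ns.getD j 0 + if c = pvAlphabets.getD j 'a' then 1 else 0 := by
  rw [pvInner, pv_foldl_step_getD c _ ns j hj, pv_countM c j hj26]
  by_cases h : c = pvAlphabets.getD j 'a' <;> simp [h]

theorem pv_outer_getD (cs : List Char) (ns : List Int) (j : Nat) (hj : j < ns.length)
    (hj26 : j < 26) :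
    (cs.foldl (fun ns c => pvInner c ns) ns).getD j 0
      = ns.getD j 0 + (cs.count (pvAlphabets.getD j 'a') : Int) := by
  induction cs generalizing ns with
  | nil => simp
  | cons c cs ih =>
      simp only [List.foldl_cons]
      rw [ih _ (by rw [pv_inner_len]; exact hj), pv_inner_getD c ns j hj hj26,
          List.count_cons]
      by_cases h : c = pvAlphabets.getD j 'a'
      · subst h
        simp only [beq_self_eq_true, if_pos]
        push_cast
        ring
      · have hb : (c == pvAlphabets.getD j 'a') = false := by simpa using h
        simp only [h, if_false, hb, Bool.false_eq_true]
        push_cast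
        ring

theorem pv_outer_len (cs : List Char) (ns : List Int) :
    (cs.foldl (fun ns c => pvInner c ns) ns).length = ns.length := by
  induction cs generalizing ns with
  | nil => rfl
  | cons c cs ih => simp only [List.foldl_cons]; rw [ih, pv_inner_len]

theorem pv_sum_foldl (h : Char → Int) (l : List Char) (a : Int) :
    l.foldl (fun r b => r + h b) a = a + (l.map h).sum := by
  induction l generalizing a with
  | nil => simp
  | cons b l ih => simp [ih]; ring

theorem pv_A_eq (str1 str2 : String) :
    compare_alphabets_num str1 str2
      = (pvAlphabets.map (fun b =>
          |((str1.toList.count b : Int)) - ((str2.toList.count b : Int))|)).sum := by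
  unfold compare_alphabets_num
  set z26 : List Int := [0,0,0,0,0,0,0,0,0,0,0,0,0,0,0,0,0,0,0,0,0,0,0,0,0,0] with hz26
  set z27 : List Int := [0,0,0,0,0,0,0,0,0,0,0,0,0,0,0,0,0,0,0,0,0,0,0,0,0,0,0] with hz27
  set n1 := str1.toList.foldl (fun ns c => pvInner c ns) z26 with hn1
  set n2 := str2.toList.foldl (fun ns c => pvInner c ns) z27 with hn2
  have hl1 : n1.length = 26 := by rw [hn1, pv_outer_len]; rfl
  have hl2 : n2.length = 27 := by rw [hn2, pv_outer_len]; rfl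
  have hz26' : ∀ j : Nat, z26.getD j 0 = 0 := by
    intro j; rw [List.getD_eq_getElem?_getD]
    rcases Nat.lt_or_ge j 26 with h | h
    · interval_cases j <;> rfl
    · rw [List.getElem?_eq_none (by rw [hz26]; simpa using h)]; rfl
  have hz27' : ∀ j : Nat, z27.getD j 0 = 0 := by
    intro j; rw [List.getD_eq_getElem?_getD]
    rcases Nat.lt_or_ge j 27 with h | h
    · interval_cases j <;> rfl
    · rw [List.getElem?_eq_none (by rw [hz27]; simpa using h)]; rfl
  have key : n1.zip n2 = pvAlphabets.map (fun b =>
      ((str1.toList.count b : Int), (str2.toList.count b : Int))) := by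
    apply List.ext_getElem
    · simp [hl1, hl2, pvAlphabets]
    · intro i h1 h2
      have hi26 : i < 26 := by
        rw [List.length_zip, hl1, hl2] at h1; omega
      rw [List.getElem_zip, List.getElem_map]
      have g1 : n1[i]'(by omega) = (str1.toList.count (pvAlphabets.getD i 'a') : Int) := by
        have hx := pv_outer_getD str1.toList z26 i (by rw [hz26]; simpa using hi26) hi26
        rw [← hn1, hz26' i, zero_add] at hx
        rw [← hx, List.getD_eq_getElem?_getD, List.getElem?_eq_getElem (by omega)]
        rfl
      have g2 : n2[i]'(by omega) = (str2.toList.count (pvAlphabets.getD i 'a') : Int) := by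
        have hx := pv_outer_getD str2.toList z27 i (by rw [hz27]; simp; omega) hi26
        rw [← hn2, hz27' i, zero_add] at hx
        rw [← hx, List.getD_eq_getElem?_getD, List.getElem?_eq_getElem (by omega)]
        rfl
      have ga : pvAlphabets.getD i 'a' = pvAlphabets[i]'(by simpa [pvAlphabets] using hi26) := by
        rw [List.getD_eq_getElem?_getD, List.getElem?_eq_getElem]; rfl
      rw [g1, g2, ga]
  rw [key, List.foldl_map,
      pv_sum_foldl (fun b => |((str1.toList.count b : Int)) - ((str2.toList.count b : Int))|) pvAlphabets 0]
  simp

-- ---------- B-side lemmas ----------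

theorem pv_isLetter_iff (c : Char) : pvIsLetter c = true ↔ c ∈ pvAlphabets := by
  have hab : "abcdefghijklmnopqrstuvwxyz".toList = pvAlphabets := by decide
  simp [pvIsLetter, hab]

theorem pv_sum_single (f g : Char → Int) (c : Char) :
    ∀ (L : List Char), L.Nodup → c ∈ L → (∀ x ∈ L, x ≠ c → f x = g x) →
      (L.map f).sum = (L.map g).sum + (f c - g c) := by
  intro L
  induction L with
  | nil => intro _ h; cases h
  | cons a L ih =>
      intro hnd hc h
      rcases List.mem_cons.mp hc with rfl | hcL
      · have : ∀ x ∈ L, f x = g x := by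
          intro x hx
          exact h x (List.mem_cons_of_mem _ hx) (by rintro rfl; exact (List.nodup_cons.mp hnd).1 hx)
        rw [List.map_cons, List.map_cons, List.sum_cons, List.sum_cons,
            List.map_congr_left this]
        ring
      · have ha : f a = g a :=
          h a List.mem_cons_self (by rintro rfl; exact (List.nodup_cons.mp hnd).1 hcL)
        rw [List.map_cons, List.map_cons, List.sum_cons, List.sum_cons,
            ih (List.nodup_cons.mp hnd).2 hcL
              (fun x hx hxc => h x (List.mem_cons_of_mem _ hx) hxc), ha]
        ring

theorem pv_alpha_nodup : pvAlphabets.Nodup := by decide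

theorem pv_len_eq (rest : List Char) (h : ∀ x ∈ rest, pvIsLetter x = true) :
    (pvAlphabets.map (fun b => ((rest.count b : Int)))).sum = rest.length := by
  induction rest with
  | nil => simp
  | cons x rest ih =>
      have hx : x ∈ pvAlphabets := (pv_isLetter_iff x).mp (h x List.mem_cons_self)
      rw [pv_sum_single (fun b => ((((x :: rest).count b : Nat)) : Int))
            (fun b => ((rest.count b : Nat) : Int)) x pvAlphabets pv_alpha_nodup hx
            (by
              intro b _ hbx
              have : (x == b) = false := by simpa using fun e => hbx e.symm
              simp [List.count_cons, this]),
          ih (fun y hy => h y (List.mem_cons_of_mem _ hy))]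
      simp

theorem pv_M_nil_left (v : List Char) (hv : ∀ x ∈ v, pvIsLetter x = true) :
    (pvAlphabets.map (fun b =>
      |((List.count b ([] : List Char) : Int)) - ((v.count b : Int))|)).sum = v.length := by
  have habs : (pvAlphabets.map (fun b =>
      |((List.count b ([] : List Char) : Int)) - ((v.count b : Int))|)).sum
      = (pvAlphabets.map (fun b => ((v.count b : Int)))).sum := by
    apply congrArg
    apply List.map_congr_left
    intro b _
    simp
  rw [habs, pv_len_eq v hv]

theorem pv_M_nil_right (u : List Char) (hu : ∀ x ∈ u, pvIsLetter x = true) :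
    (pvAlphabets.map (fun b =>
      |((u.count b : Int)) - ((List.count b ([] : List Char) : Int))|)).sum = u.length := by
  have habs : (pvAlphabets.map (fun b =>
      |((u.count b : Int)) - ((List.count b ([] : List Char) : Int))|)).sum
      = (pvAlphabets.map (fun b => ((u.count b : Int)))).sum := by
    apply congrArg
    apply List.map_congr_left
    intro b _
    simp
  rw [habs, pv_len_eq u hu]

theorem pv_M_cons_both (a : Char) (u v : List Char) :
    (pvAlphabets.map (fun b =>
      |(((a :: u).count b : Int)) - (((a :: v).count b : Int))|)).sum
    = (pvAlphabets.map (fun b =>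
      |((u.count b : Int)) - ((v.count b : Int))|)).sum := by
  apply congrArg
  apply List.map_congr_left
  intro b _
  rw [List.count_cons, List.count_cons]
  by_cases h : (a == b) = true
  · rw [h]
    simp only [if_true]
    congr 1
    push_cast
    ring
  · rw [Bool.eq_false_iff.mpr h]
    simp

theorem pv_M_cons_lt_left (a : Char) (u v : List Char) (ha : a ∈ pvAlphabets)
    (hz : v.count a = 0) :
    (pvAlphabets.map (fun b =>
      |(((a :: u).count b : Int)) - ((v.count b : Int))|)).sum
    = (pvAlphabets.map (fun b =>
      |((u.count b : Int)) - ((v.count b : Int))|)).sum + 1 := by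
  rw [pv_sum_single (fun b => |(((a :: u).count b : Int)) - ((v.count b : Int))|)
        (fun b => |((u.count b : Int)) - ((v.count b : Int))|) a pvAlphabets
        pv_alpha_nodup ha
        (by
          intro b _ hba
          have hbeq : (a == b) = false := by simpa using fun e => hba e.symm
          simp [List.count_cons, hbeq])]
  rw [List.count_cons_self, hz]
  have a1 : |((u.count a + 1 : Nat) : Int) - ((0 : Nat) : Int)| = (u.count a : Int) + 1 := by
    rw [abs_of_nonneg (by push_cast; omega)]
    push_cast; ring
  have a2 : |((u.count a : Nat) : Int) - ((0 : Nat) : Int)| = (u.count a : Int) := by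
    rw [abs_of_nonneg (by push_cast; omega)]
    push_cast; ring
  rw [a1, a2]
  ring

theorem pv_M_cons_lt_right (b : Char) (u v : List Char) (hb : b ∈ pvAlphabets)
    (hz : u.count b = 0) :
    (pvAlphabets.map (fun c =>
      |((u.count c : Int)) - (((b :: v).count c : Int))|)).sum
    = (pvAlphabets.map (fun c =>
      |((u.count c : Int)) - ((v.count c : Int))|)).sum + 1 := by
  rw [pv_sum_single (fun c => |((u.count c : Int)) - (((b :: v).count c : Int))|)
        (fun c => |((u.count c : Int)) - ((v.count c : Int))|) b pvAlphabets
        pv_alpha_nodup hb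
        (by
          intro c _ hcb
          have hbeq : (b == c) = false := by simpa using fun e => hcb e.symm
          simp [List.count_cons, hbeq])]
  rw [List.count_cons_self, hz]
  have a1 : |((0 : Nat) : Int) - ((v.count b + 1 : Nat) : Int)| = (v.count b : Int) + 1 := by
    rw [abs_of_nonpos (by push_cast; omega)]
    push_cast; ring
  have a2 : |((0 : Nat) : Int) - ((v.count b : Nat) : Int)| = (v.count b : Int) := by
    rw [abs_of_nonpos (by push_cast; omega)]
    push_cast; ring
  rw [a1, a2]
  ring

theorem pv_loop_eq (xs ys : List Char)
    (hxp : xs.Pairwise (· ≤ ·)) (hyp : ys.Pairwise (· ≤ ·))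
    (hxl : ∀ x ∈ xs, pvIsLetter x = true) (hyl : ∀ y ∈ ys, pvIsLetter y = true) :
    ∀ (n i j : Nat) (diff : Int), (xs.length - i) + (ys.length - j) ≤ n →
      pvLoop xs ys i j diff
        = diff + (pvAlphabets.map (fun b =>
            |(((xs.drop i).count b : Int)) - (((ys.drop j).count b : Int))|)).sum := by
  intro n
  induction n with
  | zero =>
      intro i j diff hm
      rw [pvLoop]
      have h : ¬ (i < xs.length ∧ j < ys.length) := by omega
      rw [dif_neg h]
      have hi : xs.length ≤ i := by omega
      have hj : ys.length ≤ j := by omega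
      rw [List.drop_eq_nil_of_le hi, List.drop_eq_nil_of_le hj]
      simp
      omega
  | succ n ih =>
      intro i j diff hm
      rw [pvLoop]
      by_cases h : i < xs.length ∧ j < ys.length
      · rw [dif_pos h]
        obtain ⟨hi, hj⟩ := h
        have hdx : xs.drop i = xs[i] :: xs.drop (i + 1) := List.drop_eq_getElem_cons hi
        have hdy : ys.drop j = ys[j] :: ys.drop (j + 1) := List.drop_eq_getElem_cons hj
        have hgx : xs.getD i 'a' = xs[i] := by
          rw [List.getD_eq_getElem?_getD, List.getElem?_eq_getElem hi]; rfl
        have hgy : ys.getD j 'a' = ys[j] := by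
          rw [List.getD_eq_getElem?_getD, List.getElem?_eq_getElem hj]; rfl
        rw [hgx, hgy]
        by_cases heq : xs[i] = ys[j]
        · rw [if_pos heq, ih (i + 1) (j + 1) diff (by omega), hdx, hdy, ← heq,
              pv_M_cons_both]
        · rw [if_neg heq]
          by_cases hlt : xs[i] < ys[j]
          · rw [if_pos hlt, ih (i + 1) j (diff + 1) (by omega), hdx]
            have hzero : (ys.drop j).count xs[i] = 0 := by
              apply List.count_eq_zero.mpr
              rw [hdy]
              intro hmem
              rcases List.mem_cons.mp hmem with he | hv
              · exact absurd he (ne_of_lt hlt)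
              · have hle : ys[j] ≤ xs[i] :=
                  List.rel_of_pairwise_cons (hdy ▸ (hyp.sublist (List.drop_sublist j ys))) hv
                exact absurd (lt_of_lt_of_le hlt hle) (lt_irrefl _)
            rw [pv_M_cons_lt_left xs[i] (xs.drop (i + 1)) (ys.drop j)
                  ((pv_isLetter_iff _).mp (hxl _ (List.getElem_mem hi))) hzero]
            ring
          · rw [if_neg hlt, ih i (j + 1) (diff + 1) (by omega), hdy]
            have hgt : ys[j] < xs[i] := by
              rcases lt_trichotomy xs[i] ys[j] with h1 | h1 | h1
              · exact absurd h1 hlt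
              · exact absurd h1 heq
              · exact h1
            have hzero : (xs.drop i).count ys[j] = 0 := by
              apply List.count_eq_zero.mpr
              rw [hdx]
              intro hmem
              rcases List.mem_cons.mp hmem with he | hu
              · exact absurd he (ne_of_lt hgt)
              · have hle : xs[i] ≤ ys[j] :=
                  List.rel_of_pairwise_cons (hdx ▸ (hxp.sublist (List.drop_sublist i xs))) hu
                exact absurd (lt_of_lt_of_le hgt hle) (lt_irrefl _)
            rw [pv_M_cons_lt_right ys[j] (xs.drop i) (ys.drop (j + 1))
                  ((pv_isLetter_iff _).mp (hyl _ (List.getElem_mem hj))) hzero]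
            ring
      · rw [dif_neg h]
        rcases Nat.lt_or_ge i xs.length with hi | hi
        · have hj : ys.length ≤ j := by omega
          rw [List.drop_eq_nil_of_le hj,
              pv_M_nil_right (xs.drop i) (fun x hx => hxl x (List.mem_of_mem_drop hx)),
              List.length_drop]
          omega
        · rw [List.drop_eq_nil_of_le hi,
              pv_M_nil_left (ys.drop j) (fun y hy => hyl y (List.mem_of_mem_drop hy)),
              List.length_drop]
          omega

theorem pv_count_filter (b : Char) (l : List Char) (hb : pvIsLetter b = true) :
    (l.filter pvIsLetter).count b = l.count b := by
  induction l with
  | nil => rfl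
  | cons x l ih =>
      by_cases hx : pvIsLetter x = true
      · rw [List.filter_cons_of_pos hx, List.count_cons, List.count_cons, ih]
      · have hne : (x == b) = false := by
          simp only [beq_eq_false_iff_ne, ne_eq]
          intro e
          exact hx (e.symm ▸ hb)
        rw [List.filter_cons_of_neg (by simpa using hx), ih, List.count_cons, hne]
        simp

theorem pv_B_eq (str1 str2 : String) :
    compare_alphabets_num_alt str1 str2
      = (pvAlphabets.map (fun b =>
          |((str1.toList.count b : Int)) - ((str2.toList.count b : Int))|)).sum := by
  unfold compare_alphabets_num_alt
  set xs := PySem.List.sorted (str1.toList.filter pvIsLetter) (fun c => c) false with hxs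
  set ys := PySem.List.sorted (str2.toList.filter pvIsLetter) (fun c => c) false with hys
  have hxp : xs.Pairwise (· ≤ ·) := by
    simpa using PySem.List.sorted_pairwise (str1.toList.filter pvIsLetter) (fun c => c)
  have hyp : ys.Pairwise (· ≤ ·) := by
    simpa using PySem.List.sorted_pairwise (str2.toList.filter pvIsLetter) (fun c => c)
  have hxl : ∀ x ∈ xs, pvIsLetter x = true := by
    intro x hx
    rw [hxs, PySem.List.mem_sorted] at hx
    exact List.of_mem_filter hx
  have hyl : ∀ y ∈ ys, pvIsLetter y = true := by
    intro y hy
    rw [hys, PySem.List.mem_sorted] at hy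
    exact List.of_mem_filter hy
  rw [pv_loop_eq xs ys hxp hyp hxl hyl (xs.length + ys.length) 0 0 0 (by omega)]
  rw [List.drop_zero, List.drop_zero, zero_add]
  apply congrArg
  apply List.map_congr_left
  intro b hb
  have hcx : xs.count b = str1.toList.count b := by
    rw [(PySem.List.sorted_perm (str1.toList.filter pvIsLetter) (fun c => c) false).count_eq,
        pv_count_filter b _ ((pv_isLetter_iff b).mpr hb)]
  have hcy : ys.count b = str2.toList.count b := by
    rw [(PySem.List.sorted_perm (str2.toList.filter pvIsLetter) (fun c => c) false).count_eq,
        pv_count_filter b _ ((pv_isLetter_iff b).mpr hb)]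
  rw [hcx, hcy]

-- ===== VERDICT (by name: the statement is the Claim_ definition above) =====
theorem compare_alphabets_num_spec : Claim_equal_compare_alphabets_num := by
  intro str1 str2 _
  unfold Spec_compare_alphabets_num
  rw [pv_A_eq, pv_B_eq]
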